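-- pv_equiv track=rewrite | github.com/abndre/TensaoResidual | commands.py | removerzero
-- ===== SOURCE A (Python) =====
-- def removerzero(vetor):
--     for key, value in enumerate(vetor):
--         if value <0:
--             vetor[key]=0
--
--     for key,value in enumerate(vetor):
--         try:
--             if vetor[key+1]==0 and value >0:
--                 vetor[key]=0
--         except:
--             pass
--     return vetor
-- ===== SOURCE B (Python) =====
-- def removerzero(vetor):
--     n = len(vetor)
--     vetor[:] = [x if x > 0 and (i + 1 == n or vetor[i + 1] > 0) else 0
--                 for i, x in enumerate(vetor)]
--     return vetor
-- ===== Notes on version B (the rewrite author's own statement) =====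
-- stated objective: simpler
-- what changed: Replaces A's two in-place mutating passes (clamp negatives, then zero positives whose successor became 0) with a single pure list comprehension over the original values, using that the clamped successor is 0 exactly when the original successor is <= 0.
import Mathlib
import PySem

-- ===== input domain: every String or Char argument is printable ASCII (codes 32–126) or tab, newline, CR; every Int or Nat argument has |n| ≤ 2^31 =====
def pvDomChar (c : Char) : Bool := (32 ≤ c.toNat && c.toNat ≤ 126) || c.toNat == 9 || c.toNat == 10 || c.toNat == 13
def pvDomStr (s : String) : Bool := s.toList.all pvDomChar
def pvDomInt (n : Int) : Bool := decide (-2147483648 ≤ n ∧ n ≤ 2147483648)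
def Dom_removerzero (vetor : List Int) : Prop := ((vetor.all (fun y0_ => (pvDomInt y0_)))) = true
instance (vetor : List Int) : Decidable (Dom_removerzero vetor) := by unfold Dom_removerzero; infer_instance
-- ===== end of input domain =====

-- B replaces A's two mutating passes with one pure comprehension over the original values;
-- objective: simpler (equivalence is about the return value; both A and B also mutate `vetor` in place to that same value).

-- ===== PORT A =====
-- pass 1: for key, value in enumerate(vetor): if value < 0: vetor[key] = 0
-- pass 2: for key, value in enumerate(vetor): try: if vetor[key+1]==0 and value>0: vetor[key]=0 except: pass
-- (Python's live reads during each loop coincide with these snapshot reads: each step only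
--  writes at the current index, so indices ≥ current are still untouched when read.)
def removerzero (vetor : List Int) : List Int :=
  let v1 := (PySem.List.enumerate vetor).foldl
    (fun w p => if p.2 < 0 then PySem.List.pySetD w p.1 0 else w) vetor
  (PySem.List.enumerate v1).foldl
    (fun (w : List Int) (p : Int × Int) =>
      match PySem.List.pyGet? w (p.1 + 1) with
      | none => w                                   -- IndexError, caught by `except: pass`
      | some nxt => if nxt = 0 ∧ p.2 > 0 then PySem.List.pySetD w p.1 0 else w) v1

-- ===== PORT B =====
-- vetor[:] = [x if x > 0 and (i+1 == n or vetor[i+1] > 0) else 0 for i, x in enumerate(vetor)]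
def removerzero_alt (vetor : List Int) : List Int :=
  (PySem.List.enumerate vetor).map
    (fun p => if 0 < p.2 ∧ (p.1 + 1 = PySem.List.len vetor ∨ 0 < PySem.List.pyGetD vetor (p.1 + 1) 0)
              then p.2 else 0)

-- ===== PRECONDITION & SPEC =====
def Spec_removerzero (vetor : List Int) (out : List Int) : Prop := out = removerzero_alt vetor
instance (vetor : List Int) (out : List Int) : Decidable (Spec_removerzero vetor out) := by unfold Spec_removerzero; infer_instance

-- ===== CLAIM (what is proved, stated in full; the proofs are below) =====
def Claim_equal_removerzero : Prop := ∀ (vetor : List Int), Dom_removerzero vetor → Spec_removerzero vetor (removerzero vetor)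

-- ===== LEMMAS AND PROOFS =====

def rzClamp (x : Int) : Int := if x < 0 then 0 else x

def rzOut2 : List Int → List Int
  | [] => []
  | [x] => [x]
  | x :: y :: t => (if y = 0 ∧ x > 0 then 0 else x) :: rzOut2 (y :: t)

theorem rz_set_append_len (pre : List Int) (x v : Int) (xs : List Int) :
    (pre ++ x :: xs).set pre.length v = pre ++ v :: xs := by
  induction pre with
  | nil => simp
  | cons a pre ih => simp [ih]

theorem rz_pass1_gen : ∀ (xs pre : List Int),
    (PySem.List.enumerate xs (pre.length : Int)).foldl
      (fun w p => if p.2 < 0 then PySem.List.pySetD w p.1 0 else w) (pre ++ xs)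
    = pre ++ xs.map rzClamp := by
  intro xs
  induction xs with
  | nil => intro pre; simp [PySem.List.enumerate_nil]
  | cons x xs ih =>
    intro pre
    rw [PySem.List.enumerate_cons]
    have hstart : (pre.length : Int) + 1 = ((pre ++ [rzClamp x]).length : Int) := by
      simp
    by_cases hx : x < 0
    · simp only [List.foldl_cons, hx, PySem.List.pySetD_natCast,
        rz_set_append_len]
      have h0 : rzClamp x = 0 := by simp [rzClamp, hx]
      calc (PySem.List.enumerate xs ((pre.length : Int) + 1)).foldl
              (fun w p => if p.2 < 0 then PySem.List.pySetD w p.1 0 else w) (pre ++ 0 :: xs)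
          = (PySem.List.enumerate xs (((pre ++ [rzClamp x]).length : Int))).foldl
              (fun w p => if p.2 < 0 then PySem.List.pySetD w p.1 0 else w)
              ((pre ++ [rzClamp x]) ++ xs) := by
            rw [hstart, h0]; simp
        _ = (pre ++ [rzClamp x]) ++ xs.map rzClamp := ih (pre ++ [rzClamp x])
        _ = pre ++ (x :: xs).map rzClamp := by simp [h0]
    · simp only [List.foldl_cons, if_neg hx]
      have h0 : rzClamp x = x := by simp [rzClamp, hx]
      calc (PySem.List.enumerate xs ((pre.length : Int) + 1)).foldl
              (fun w p => if p.2 < 0 then PySem.List.pySetD w p.1 0 else w) (pre ++ x :: xs)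
          = (PySem.List.enumerate xs (((pre ++ [rzClamp x]).length : Int))).foldl
              (fun w p => if p.2 < 0 then PySem.List.pySetD w p.1 0 else w)
              ((pre ++ [rzClamp x]) ++ xs) := by
            rw [hstart, h0]; simp
        _ = (pre ++ [rzClamp x]) ++ xs.map rzClamp := ih (pre ++ [rzClamp x])
        _ = pre ++ (x :: xs).map rzClamp := by simp [h0]

theorem rz_get_next (pre : List Int) (x : Int) (xs : List Int) :
    PySem.List.pyGet? (pre ++ x :: xs) ((pre.length : Int) + 1) = xs[0]? := by
  have : ((pre.length : Int) + 1) = (((pre.length + 1 : Nat)) : Int) := by push_cast; omega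
  rw [this, PySem.List.pyGet?_natCast]
  rw [List.getElem?_append_right (by omega)]
  simp

theorem rz_pass2_gen : ∀ (xs pre : List Int),
    (PySem.List.enumerate xs (pre.length : Int)).foldl
      (fun (w : List Int) (p : Int × Int) =>
        match PySem.List.pyGet? w (p.1 + 1) with
        | none => w
        | some nxt => if nxt = 0 ∧ p.2 > 0 then PySem.List.pySetD w p.1 0 else w)
      (pre ++ xs)
    = pre ++ rzOut2 xs := by
  intro xs
  induction xs with
  | nil => intro pre; simp [PySem.List.enumerate_nil, rzOut2]
  | cons x xs ih =>
    intro pre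
    rw [PySem.List.enumerate_cons, List.foldl_cons]
    have hget := rz_get_next pre x xs
    cases xs with
    | nil =>
      simp only [List.getElem?_nil] at hget
      simp [hget, PySem.List.enumerate_nil, rzOut2]
    | cons y t =>
      simp only [List.getElem?_cons_zero] at hget
      simp only [hget]
      by_cases hc : y = 0 ∧ x > 0
      · simp only [if_pos hc, PySem.List.pySetD_natCast, rz_set_append_len]
        have hstart : (pre.length : Int) + 1 = ((pre ++ [(0 : Int)]).length : Int) := by simp
        have := ih (pre ++ [(0 : Int)])
        rw [hstart]
        calc (PySem.List.enumerate (y :: t) (((pre ++ [(0:Int)]).length : Int))).foldl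
                (fun (w : List Int) (p : Int × Int) =>
                  match PySem.List.pyGet? w (p.1 + 1) with
                  | none => w
                  | some nxt => if nxt = 0 ∧ p.2 > 0 then PySem.List.pySetD w p.1 0 else w)
                (pre ++ 0 :: y :: t)
            = (pre ++ [(0:Int)]) ++ rzOut2 (y :: t) := by
              rw [← this]; simp
          _ = pre ++ rzOut2 (x :: y :: t) := by simp [rzOut2, hc]
      · simp only [if_neg hc]
        have hstart : (pre.length : Int) + 1 = ((pre ++ [x]).length : Int) := by simp
        have := ih (pre ++ [x])
        rw [hstart]
        calc (PySem.List.enumerate (y :: t) (((pre ++ [x]).length : Int))).foldl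
                (fun (w : List Int) (p : Int × Int) =>
                  match PySem.List.pyGet? w (p.1 + 1) with
                  | none => w
                  | some nxt => if nxt = 0 ∧ p.2 > 0 then PySem.List.pySetD w p.1 0 else w)
                (pre ++ x :: y :: t)
            = (pre ++ [x]) ++ rzOut2 (y :: t) := by
              rw [← this]; simp
          _ = pre ++ rzOut2 (x :: y :: t) := by simp [rzOut2, hc]

theorem rz_getD_next (pre : List Int) (x y : Int) (t : List Int) :
    PySem.List.pyGetD (pre ++ x :: y :: t) ((pre.length : Int) + 1) 0 = y := by
  have : ((pre.length : Int) + 1) = (((pre.length + 1 : Nat)) : Int) := by push_cast; omega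
  rw [this, PySem.List.pyGetD_natCast]
  rw [List.getD, List.getElem?_append_right (by omega)]
  simp

theorem rz_alt_gen (v : List Int) : ∀ (xs pre : List Int), v = pre ++ xs →
    (PySem.List.enumerate xs (pre.length : Int)).map
      (fun p => if 0 < p.2 ∧ (p.1 + 1 = PySem.List.len v ∨ 0 < PySem.List.pyGetD v (p.1 + 1) 0)
                then p.2 else 0)
    = rzOut2 (xs.map rzClamp) := by
  intro xs
  induction xs with
  | nil => intro pre _; simp [PySem.List.enumerate_nil, rzOut2]
  | cons x xs ih =>
    intro pre hv
    rw [PySem.List.enumerate_cons, List.map_cons]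
    have hlen : PySem.List.len v = ((pre.length + 1 + xs.length : Nat) : Int) := by
      simp [hv]; omega
    have hstart : (pre.length : Int) + 1 = ((pre ++ [x]).length : Int) := by simp
    have htail : (PySem.List.enumerate xs ((pre.length : Int) + 1)).map
        (fun p => if 0 < p.2 ∧ (p.1 + 1 = PySem.List.len v ∨ 0 < PySem.List.pyGetD v (p.1 + 1) 0)
                  then p.2 else 0) = rzOut2 (xs.map rzClamp) := by
      rw [hstart]
      exact ih (pre ++ [x]) (by simp [hv])
    rw [htail]
    -- head element
    cases xs with
    | nil =>
      have hlast : (pre.length : Int) + 1 = PySem.List.len v := by rw [hlen]; simp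
      have hcond : (0 < x ∧ ((pre.length : Int) + 1 = PySem.List.len v ∨
          0 < PySem.List.pyGetD v ((pre.length : Int) + 1) 0)) ↔ 0 < x :=
        ⟨fun h => h.1, fun h => ⟨h, Or.inl hlast⟩⟩
      simp only [List.map_nil, rzOut2, List.map_cons, hcond, rzClamp]
      congr 1
      split_ifs <;> omega
    | cons y t =>
      have hnotlast : ¬ ((pre.length : Int) + 1 = PySem.List.len v) := by
        rw [hlen]; push_cast; simp; omega
      have hnext : PySem.List.pyGetD v ((pre.length : Int) + 1) 0 = y := by
        rw [hv]; exact rz_getD_next pre x y t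
      simp only [List.map_cons, rzOut2, hnext]
      congr 1
      simp only [rzClamp, hnotlast, false_or]
      split_ifs <;> omega

theorem rz_A_eq (v : List Int) : removerzero v = rzOut2 (v.map rzClamp) := by
  unfold removerzero
  have h1 : (PySem.List.enumerate v).foldl
      (fun w p => if p.2 < 0 then PySem.List.pySetD w p.1 0 else w) v = v.map rzClamp := by
    have := rz_pass1_gen v []
    simpa using this
  rw [h1]
  have := rz_pass2_gen (v.map rzClamp) []
  simpa using this

theorem rz_B_eq (v : List Int) : removerzero_alt v = rzOut2 (v.map rzClamp) := by
  unfold removerzero_alt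
  have := rz_alt_gen v v [] (by simp)
  simpa using this

-- ===== VERDICT (by name: the statement is the Claim_ definition above) =====
theorem removerzero_spec : Claim_equal_removerzero := by
  intro v _
  unfold Spec_removerzero
  rw [rz_A_eq, rz_B_eq]
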